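-- pv_equiv track=rewrite | github.com/padiac/NebulaPilot | src/nebulapilot/scanner.py | normalize_filter
-- ===== SOURCE A (Python) =====
-- def normalize_filter(filter_name):
--     """Normalize filter names to L, R, G, B, S, H, O."""
--     name = filter_name.upper().strip()
--
--     if name in ["L", "LUM", "LUMINANCE"]:
--         return "L"
--     if name in ["R", "RED"]:
--         return "R"
--     if name in ["G", "GREEN"]:
--         return "G"
--     if name in ["B", "BLUE"]:
--         return "B"
--
--     # Narrowband
--     if any(x in name for x in ["HA", "H-ALPHA", "H_ALPHA"]):
--         return "H"
--     if any(x in name for x in ["OIII", "O3", "O-III"]):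
--         return "O"
--     if any(x in name for x in ["SII", "S2", "S-II"]):
--         return "S"
--
--     return name
-- ===== SOURCE B (Python) =====
-- # Different algorithm: exact names resolved by one dict lookup; narrowband detected by
-- # sliding a window over the name (scanning the text against a pattern->letter dict at
-- # each position), collecting matched letters, then picking by priority H,O,S.
-- _EXACT = {"L": "L", "LUM": "L", "LUMINANCE": "L",
--           "R": "R", "RED": "R", "G": "G", "GREEN": "G",
--           "B": "B", "BLUE": "B"}
-- _NB = {"HA": "H", "S2": "S", "O3": "O", "SII": "S", "OIII": "O",
--        "S-II": "S", "O-III": "O", "H-ALPHA": "H", "H_ALPHA": "H"}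
--
-- def normalize_filter(filter_name):
--     name = filter_name.upper().strip()
--     letter = _EXACT.get(name)
--     if letter is not None:
--         return letter
--     found = ""
--     for i in range(len(name)):
--         for width in (2, 3, 4, 5, 7):   # the distinct pattern lengths
--             hit = _NB.get(name[i:i + width])
--             if hit:
--                 found += hit
--     for letter in "HOS":
--         if letter in found:
--             return letter
--     return name
-- ===== Notes on version B (the rewrite author's own statement) =====
-- stated objective: alternative
-- what changed: Instead of A's branch chain that searches each hard-coded pattern inside the name, B resolves exact names by one dict lookup and detects narrowband by sliding a window over the name, looking each window up in a pattern-to-letter dict, collecting matched letters and picking the first by priority H,O,S.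
import Mathlib
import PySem

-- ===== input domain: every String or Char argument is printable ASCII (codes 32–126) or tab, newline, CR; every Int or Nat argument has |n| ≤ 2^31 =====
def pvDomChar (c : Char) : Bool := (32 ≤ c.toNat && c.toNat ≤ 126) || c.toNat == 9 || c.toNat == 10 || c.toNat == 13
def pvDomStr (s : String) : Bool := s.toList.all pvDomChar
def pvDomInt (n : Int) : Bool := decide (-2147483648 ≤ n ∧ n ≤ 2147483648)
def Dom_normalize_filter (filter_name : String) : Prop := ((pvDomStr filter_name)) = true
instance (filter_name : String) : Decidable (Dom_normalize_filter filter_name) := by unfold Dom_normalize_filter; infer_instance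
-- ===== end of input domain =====

-- B resolves exact names by one dict lookup and detects narrowband by sliding a window over the name against a pattern->letter dict, collecting letters and picking by priority; objective: alternative algorithm, same cost.


-- ===== PORT A =====
def normalize_filter (filter_name : String) : String :=
  let name := PySem.Str.strip (PySem.Str.upper filter_name)
  if ["L", "LUM", "LUMINANCE"].contains name then "L"
  else if ["R", "RED"].contains name then "R"
  else if ["G", "GREEN"].contains name then "G"
  else if ["B", "BLUE"].contains name then "B"
  else if ["HA", "H-ALPHA", "H_ALPHA"].any (fun x => PySem.Str.isIn x name) then "H"
  else if ["OIII", "O3", "O-III"].any (fun x => PySem.Str.isIn x name) then "O"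
  else if ["SII", "S2", "S-II"].any (fun x => PySem.Str.isIn x name) then "S"
  else name

-- ===== PORT B =====
-- _EXACT.get(name): literal dict lookup (distinct keys, so first-match = this chain)
def pvExactGet (name : String) : Option String :=
  if name = "L" then some "L"
  else if name = "LUM" then some "L"
  else if name = "LUMINANCE" then some "L"
  else if name = "R" then some "R"
  else if name = "RED" then some "R"
  else if name = "G" then some "G"
  else if name = "GREEN" then some "G"
  else if name = "B" then some "B"
  else if name = "BLUE" then some "B"
  else none

-- _NB.get(window): literal dict lookup over the sliding window (a 1-char Python str -> Char)
def pvNbGet (s : List Char) : Option Char :=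
  if s = "HA".toList then some 'H'
  else if s = "S2".toList then some 'S'
  else if s = "O3".toList then some 'O'
  else if s = "SII".toList then some 'S'
  else if s = "OIII".toList then some 'O'
  else if s = "S-II".toList then some 'S'
  else if s = "O-III".toList then some 'O'
  else if s = "H-ALPHA".toList then some 'H'
  else if s = "H_ALPHA".toList then some 'H'
  else none

-- the double loop building `found` (name[i:i+width] is slice; found += hit appends the letter)
def pvScan (name : List Char) : List Char :=
  (PySem.List.pyRange 0 (name.length : Int) 1).foldl
    (fun found i =>
      [(2 : Int), 3, 4, 5, 7].foldl
        (fun found width =>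
          match pvNbGet (PySem.List.slice name (some i) (some (i + width))) with
          | some c => found ++ [c]
          | none => found)
        found)
    []

-- `for letter in "HOS": if letter in found: return letter` (char-in-string = list membership)
def pvPrio : List Char → List Char → Option Char
  | [], _ => none
  | c :: rest, found => if found.contains c then some c else pvPrio rest found

def normalize_filter_alt (filter_name : String) : String :=
  let name := PySem.Str.strip (PySem.Str.upper filter_name)
  match pvExactGet name with
  | some letter => letter
  | none =>
    match pvPrio "HOS".toList (pvScan name.toList) with
    | some letter => String.ofList [letter]
    | none => name

-- ===== PRECONDITION & SPEC =====
def Spec_normalize_filter (filter_name : String) (out : String) : Prop := out = normalize_filter_alt filter_name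
instance (filter_name : String) (out : String) : Decidable (Spec_normalize_filter filter_name out) := by unfold Spec_normalize_filter; infer_instance

-- ===== CLAIM (what is proved, stated in full; the proofs are below) =====
def Claim_equal_normalize_filter : Prop := ∀ (filter_name : String), Dom_normalize_filter filter_name → Spec_normalize_filter filter_name (normalize_filter filter_name)

-- ===== LEMMAS AND PROOFS =====

-- the per-position hits of the inner width loop, as a flat list
def pvHits (name : List Char) (i : Int) : List Char :=
  [(2 : Int), 3, 4, 5, 7].flatMap
    (fun width => (pvNbGet (PySem.List.slice name (some i) (some (i + width)))).toList)

lemma inner_eq (name : List Char) (i : Int) (found : List Char) :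
    [(2 : Int), 3, 4, 5, 7].foldl
        (fun found width =>
          match pvNbGet (PySem.List.slice name (some i) (some (i + width))) with
          | some c => found ++ [c]
          | none => found)
        found = found ++ pvHits name i := by
  simp only [List.foldl, pvHits, List.flatMap_cons, List.flatMap_nil, List.append_nil]
  rcases pvNbGet (PySem.List.slice name (some i) (some (i + 2))) with _ | c2 <;>
  rcases pvNbGet (PySem.List.slice name (some i) (some (i + 3))) with _ | c3 <;>
  rcases pvNbGet (PySem.List.slice name (some i) (some (i + 4))) with _ | c4 <;>
  rcases pvNbGet (PySem.List.slice name (some i) (some (i + 5))) with _ | c5 <;>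
  rcases pvNbGet (PySem.List.slice name (some i) (some (i + 7))) with _ | c7 <;>
  simp

lemma pvScan_eq_flatMap (name : List Char) :
    pvScan name = (PySem.List.pyRange 0 (name.length : Int) 1).flatMap (pvHits name) := by
  unfold pvScan
  rw [PySem.List.foldl_congr_mem _ _ (fun found i => found ++ pvHits name i) _
      (by intro acc i _; exact inner_eq name i acc),
    PySem.List.foldl_append_eq_flatMap]
  simp

lemma mem_pvScan (name : List Char) (c : Char) :
    c ∈ pvScan name ↔
      ∃ i, (0 ≤ i ∧ i < (name.length : Int)) ∧
        ∃ width, width ∈ [(2 : Int), 3, 4, 5, 7] ∧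
          pvNbGet (PySem.List.slice name (some i) (some (i + width))) = some c := by
  rw [pvScan_eq_flatMap]
  simp [pvHits, PySem.List.mem_pyRange_one, Option.mem_toList]

lemma slice_hit_iff (name p : List Char) (hp : p ≠ []) (hl : ((p.length : Int)) ∈ [(2 : Int), 3, 4, 5, 7]) :
    (∃ i, (0 ≤ i ∧ i < (name.length : Int)) ∧
      ∃ width, width ∈ [(2 : Int), 3, 4, 5, 7] ∧
        PySem.List.slice name (some i) (some (i + width)) = p) ↔
    PySem.Chars.isIn p name = true := by
  rw [← PySem.Chars.exists_prefix_drop_iff_isIn]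
  constructor
  · rintro ⟨i, ⟨hi0, _⟩, width, hw, hs⟩
    have hw0 : (0:Int) ≤ width := by fin_cases hw <;> norm_num
    rw [PySem.List.slice_toNat name hi0 (by omega)] at hs
    exact ⟨i.toNat, hs ▸ List.take_prefix _ _⟩
  · rintro ⟨j, hj⟩
    have hjlt : j < name.length := by
      by_contra h
      have : List.drop j name = [] := List.drop_eq_nil_of_le (by omega)
      rw [this] at hj
      exact hp (List.prefix_nil.mp hj)
    refine ⟨(j : Int), ⟨by positivity, by exact_mod_cast hjlt⟩, (p.length : Int), hl, ?_⟩
    rw [PySem.List.slice_toNat name (by positivity) (by positivity)]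
    have : ((j:Int) + (p.length:Int)).toNat - ((j:Int)).toNat = p.length := by omega
    rw [this, Int.toNat_natCast]
    exact (List.prefix_iff_eq_take.mp hj).symm

lemma nbGet_eq_H (s : List Char) :
    pvNbGet s = some 'H' ↔
      (s = "HA".toList ∨ s = "H-ALPHA".toList ∨ s = "H_ALPHA".toList) := by
  unfold pvNbGet
  split_ifs <;> simp_all

lemma nbGet_eq_O (s : List Char) :
    pvNbGet s = some 'O' ↔
      (s = "OIII".toList ∨ s = "O3".toList ∨ s = "O-III".toList) := by
  unfold pvNbGet
  split_ifs <;> simp_all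

lemma nbGet_eq_S (s : List Char) :
    pvNbGet s = some 'S' ↔
      (s = "SII".toList ∨ s = "S2".toList ∨ s = "S-II".toList) := by
  unfold pvNbGet
  split_ifs <;> simp_all

lemma found_gen (name : List Char) (c : Char) (p1 p2 p3 : List Char)
    (hc : ∀ s, pvNbGet s = some c ↔ (s = p1 ∨ s = p2 ∨ s = p3))
    (h1 : p1 ≠ []) (h2 : p2 ≠ []) (h3 : p3 ≠ [])
    (l1 : ((p1.length : Int)) ∈ [(2 : Int), 3, 4, 5, 7])
    (l2 : ((p2.length : Int)) ∈ [(2 : Int), 3, 4, 5, 7])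
    (l3 : ((p3.length : Int)) ∈ [(2 : Int), 3, 4, 5, 7]) :
    (c ∈ pvScan name) ↔
      (PySem.Chars.isIn p1 name = true ∨ PySem.Chars.isIn p2 name = true ∨
       PySem.Chars.isIn p3 name = true) := by
  rw [mem_pvScan,
    ← slice_hit_iff name p1 h1 l1, ← slice_hit_iff name p2 h2 l2, ← slice_hit_iff name p3 h3 l3]
  constructor
  · rintro ⟨i, hi, w, hw, hg⟩
    rcases (hc _).mp hg with h | h | h
    · exact Or.inl ⟨i, hi, w, hw, h⟩
    · exact Or.inr (Or.inl ⟨i, hi, w, hw, h⟩)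
    · exact Or.inr (Or.inr ⟨i, hi, w, hw, h⟩)
  · rintro (⟨i, hi, w, hw, h⟩ | ⟨i, hi, w, hw, h⟩ | ⟨i, hi, w, hw, h⟩) <;>
      exact ⟨i, hi, w, hw, (hc _).mpr (by tauto)⟩

lemma found_H (name : List Char) :
    ('H' ∈ pvScan name) ↔
      (PySem.Chars.isIn "HA".toList name = true ∨ PySem.Chars.isIn "H-ALPHA".toList name = true ∨
       PySem.Chars.isIn "H_ALPHA".toList name = true) :=
  found_gen name 'H' _ _ _ nbGet_eq_H (by decide) (by decide) (by decide)
    (by decide) (by decide) (by decide)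

lemma found_O (name : List Char) :
    ('O' ∈ pvScan name) ↔
      (PySem.Chars.isIn "OIII".toList name = true ∨ PySem.Chars.isIn "O3".toList name = true ∨
       PySem.Chars.isIn "O-III".toList name = true) :=
  found_gen name 'O' _ _ _ nbGet_eq_O (by decide) (by decide) (by decide)
    (by decide) (by decide) (by decide)

lemma found_S (name : List Char) :
    ('S' ∈ pvScan name) ↔
      (PySem.Chars.isIn "SII".toList name = true ∨ PySem.Chars.isIn "S2".toList name = true ∨
       PySem.Chars.isIn "S-II".toList name = true) :=
  found_gen name 'S' _ _ _ nbGet_eq_S (by decide) (by decide) (by decide)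
    (by decide) (by decide) (by decide)


lemma pvCore (name : String) :
    (if ["L", "LUM", "LUMINANCE"].contains name then "L"
     else if ["R", "RED"].contains name then "R"
     else if ["G", "GREEN"].contains name then "G"
     else if ["B", "BLUE"].contains name then "B"
     else if ["HA", "H-ALPHA", "H_ALPHA"].any (fun x => PySem.Str.isIn x name) then "H"
     else if ["OIII", "O3", "O-III"].any (fun x => PySem.Str.isIn x name) then "O"
     else if ["SII", "S2", "S-II"].any (fun x => PySem.Str.isIn x name) then "S"
     else name) =
    (match pvExactGet name with
     | some letter => letter
     | none =>
       match pvPrio "HOS".toList (pvScan name.toList) with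
       | some letter => String.ofList [letter]
       | none => name) := by
  by_cases h1 : name = "L"
  · subst h1; decide
  by_cases h2 : name = "LUM"
  · subst h2; decide
  by_cases h3 : name = "LUMINANCE"
  · subst h3; decide
  by_cases h4 : name = "R"
  · subst h4; decide
  by_cases h5 : name = "RED"
  · subst h5; decide
  by_cases h6 : name = "G"
  · subst h6; decide
  by_cases h7 : name = "GREEN"
  · subst h7; decide
  by_cases h8 : name = "B"
  · subst h8; decide
  by_cases h9 : name = "BLUE"
  · subst h9; decide
  have hE : pvExactGet name = none := by
    simp [pvExactGet, h1, h2, h3, h4, h5, h6, h7, h8, h9]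
  rw [hE]
  have hAH : (["HA", "H-ALPHA", "H_ALPHA"].any (fun x => PySem.Str.isIn x name)) =
      decide ('H' ∈ pvScan name.toList) := by
    simp [found_H, PySem.Str.isIn]
  have hAO : (["OIII", "O3", "O-III"].any (fun x => PySem.Str.isIn x name)) =
      decide ('O' ∈ pvScan name.toList) := by
    simp [found_O, PySem.Str.isIn]
  have hAS : (["SII", "S2", "S-II"].any (fun x => PySem.Str.isIn x name)) =
      decide ('S' ∈ pvScan name.toList) := by
    simp [found_S, PySem.Str.isIn]
  have hC1 : (["L", "LUM", "LUMINANCE"].contains name) = false := by simp [h1, h2, h3]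
  have hC2 : (["R", "RED"].contains name) = false := by simp [h4, h5]
  have hC3 : (["G", "GREEN"].contains name) = false := by simp [h6, h7]
  have hC4 : (["B", "BLUE"].contains name) = false := by simp [h8, h9]
  rw [hC1, hC2, hC3, hC4, hAH, hAO, hAS, show ("HOS" : String).toList = ['H', 'O', 'S'] from rfl]
  by_cases hH : 'H' ∈ pvScan name.toList
  · simp [pvPrio, hH]
  by_cases hO : 'O' ∈ pvScan name.toList
  · simp [pvPrio, hH, hO]
  by_cases hS : 'S' ∈ pvScan name.toList
  · simp [pvPrio, hH, hO, hS]
  · simp [pvPrio, hH, hO, hS]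
-- ===== VERDICT (by name: the statement is the Claim_ definition above) =====
theorem normalize_filter_spec : Claim_equal_normalize_filter := by
  intro fn _
  unfold Spec_normalize_filter normalize_filter normalize_filter_alt
  exact pvCore (PySem.Str.strip (PySem.Str.upper fn))
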